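-- pv_equiv track=rewrite | github.com/jhyeom1545/Backjoon_algorithm_study | 프로그래머스/unrated/181831. 특별한 이차원 배열 2/특별한 이차원 배열 2.py | solution
-- ===== SOURCE A (Python) =====
-- def solution(arr):
--     answer = 1
--     n = len(arr)
--     for i in range(len(arr)):
--         for j in range(len(arr[i])):
--             if arr[i][j] != arr[j][i]:
--                 return 0
--     return answer
-- ===== SOURCE B (Python) =====
-- def solution(arr):
--     return 1 if [list(col) for col in zip(*arr)] == arr else 0
-- ===== Notes on version B (the rewrite author's own statement) =====
-- stated objective: simpler
-- what changed: B materializes the transpose with zip(*arr) and does one whole-matrix equality instead of A's nested index loops with an early return.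
-- outside the precondition, e.g. on solution([[1, 1], [1]]): A returns 1, B returns 0; on solution([[]]): A returns 1, B returns 0
import Mathlib
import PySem

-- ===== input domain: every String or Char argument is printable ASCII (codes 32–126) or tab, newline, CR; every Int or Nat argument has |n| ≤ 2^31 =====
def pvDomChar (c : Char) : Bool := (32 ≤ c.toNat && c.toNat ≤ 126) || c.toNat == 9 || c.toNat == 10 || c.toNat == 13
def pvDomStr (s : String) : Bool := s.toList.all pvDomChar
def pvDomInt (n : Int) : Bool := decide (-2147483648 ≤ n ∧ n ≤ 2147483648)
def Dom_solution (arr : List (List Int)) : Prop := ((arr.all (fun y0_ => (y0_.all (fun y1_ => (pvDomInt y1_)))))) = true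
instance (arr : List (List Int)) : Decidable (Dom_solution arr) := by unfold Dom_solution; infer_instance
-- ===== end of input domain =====

-- B replaces A's nested index loops (early return on the first asymmetric pair) by
-- materializing the transpose and one whole-matrix equality; objective: simpler.

-- ===== PORT A =====
-- A's nested for-loops with early `return 0` become nested `all` over the same ranges,
-- with the same indexing arr[i][j] vs arr[j][i] (indices are in range inside Pre_).
def solution (arr : List (List Int)) : Int :=
  if (List.range arr.length).all (fun i =>
       (List.range ((arr.getD i []).length)).all (fun j =>
         decide ((arr.getD i []).getD j 0 = (arr.getD j []).getD i 0)))
  then 1 else 0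

-- ===== PORT B =====
-- zip(*arr): take heads of all rows while every row is nonempty (Python zip truncates
-- at the shortest row); fuel = length of the first row bounds the number of steps.
def zipCols (fuel : Nat) (rows : List (List Int)) : List (List Int) :=
  match fuel with
  | 0 => []
  | k+1 =>
    if rows.any (fun r => r.isEmpty) then []
    else (rows.map (fun r => r.headD 0)) :: zipCols k (rows.map (fun r => r.tail))

def solution_alt (arr : List (List Int)) : Int :=
  if (match arr with
      | [] => ([] : List (List Int))
      | r :: _ => zipCols r.length arr) = arr
  then 1 else 0

-- ===== PRECONDITION & SPEC =====
-- Pre_ admits square matrices, and non-square (incl. ragged) matrices in which A's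
-- row-major scan meets an in-range asymmetric pair before any out-of-range access
-- (there A returns 0, like B).  It excludes the remaining non-square inputs: there A
-- raises IndexError or, by an accident of its partial traversal, returns 1
-- (e.g. [[1,1],[1]], [[]]) where B's transpose comparison gives 0.
def Pre_solution (arr : List (List Int)) : Prop :=
  (∀ r ∈ arr, r.length = arr.length) ∨
  (¬ (∀ r ∈ arr, r.length = arr.length) ∧
   ((List.range arr.length).any fun i =>
      (List.range ((arr.getD i []).length)).any fun j =>
        (decide (j < arr.length ∧ i < (arr.getD j []).length ∧
           ¬ (arr.getD i []).getD j 0 = (arr.getD j []).getD i 0) &&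
         -- …and every position the scan visits before (i, j) is in range
         (List.range (i + 1)).all fun i' =>
           (List.range ((arr.getD i' []).length)).all fun j' =>
             decide (i' < i ∨ (i' = i ∧ j' < j) →
               (j' < arr.length ∧ i' < (arr.getD j' []).length)))) = true)
instance (arr : List (List Int)) : Decidable (Pre_solution arr) := by unfold Pre_solution; infer_instance
def pvWitness_solution : List (List Int) := [[1, 2], [2, 1]]

def Spec_solution (arr : List (List Int)) (out : Int) : Prop := out = solution_alt arr
instance (arr : List (List Int)) (out : Int) : Decidable (Spec_solution arr out) := by unfold Spec_solution; infer_instance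

-- ===== CLAIM (what is proved, stated in full; the proofs are below) =====
def Claim_equal_solution : Prop := ∀ (arr : List (List Int)), Dom_solution arr → Pre_solution arr → Spec_solution arr (solution arr)

-- ===== LEMMAS AND PROOFS =====

theorem zipCols_eq (k : Nat) (rows : List (List Int)) (hne : rows ≠ [])
    (hlen : ∀ r ∈ rows, r.length = k) :
    zipCols k rows = (List.range k).map (fun m => rows.map (fun r => r.getD m 0)) := by
  induction k generalizing rows with
  | zero => simp [zipCols]
  | succ k ih =>
    have hAny : rows.any (fun r => r.isEmpty) = false := by
      simp only [List.any_eq_false]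
      intro r hr
      have hne' : r ≠ [] := by
        intro h
        have hl := hlen r hr
        rw [h] at hl
        simp at hl
      obtain ⟨a, t, rfl⟩ := List.exists_cons_of_ne_nil hne'
      simp
    rw [zipCols, hAny]
    simp only [Bool.false_eq_true, if_false]
    rw [List.range_succ_eq_map]
    rw [List.map_cons]
    congr 1
    · apply List.map_congr_left
      intro r _; cases r <;> simp
    · rw [ih (rows.map (fun r => r.tail)) (by simpa using hne)]
      · rw [List.map_map]
        apply List.map_congr_left
        intro m _
        simp only [Function.comp_apply, List.map_map]
        apply List.map_congr_left
        intro r hr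
        have hne' : r ≠ [] := by
          intro h
          have hl := hlen r hr
          rw [h] at hl
          simp at hl
        obtain ⟨a, t, rfl⟩ := List.exists_cons_of_ne_nil hne'
        simp
      · intro r hr
        obtain ⟨s, hs, rfl⟩ := List.mem_map.mp hr
        have hl := hlen s hs
        cases s with
        | nil => simp at hl
        | cons a t =>
          simp only [List.length_cons] at hl
          simp only [List.tail_cons]
          omega

theorem zipCols_row_length (k : Nat) (rows : List (List Int)) (x : List Int)
    (hx : x ∈ zipCols k rows) : x.length = rows.length := by
  induction k generalizing rows with
  | zero => simp [zipCols] at hx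
  | succ k ih =>
    rw [zipCols] at hx
    by_cases hAny : rows.any (fun r => r.isEmpty)
    · simp [hAny] at hx
    · rw [if_neg hAny] at hx
      cases hx with
      | head => simp
      | tail _ h => rw [ih (rows.map (fun r => r.tail)) h]; simp

theorem main_aux (r : List Int) (rest : List (List Int))
    (hpre : ∀ s ∈ r :: rest, s.length = (r :: rest).length) :
    solution (r :: rest) = solution_alt (r :: rest) := by
  unfold solution solution_alt
  have hr : r.length = (r :: rest).length := hpre r (List.mem_cons_self)
  have hn : ∀ i (h : i < (r :: rest).length), ((r :: rest)[i]).length = (r :: rest).length :=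
    fun i h => hpre _ (List.getElem_mem h)
  show _ = (if zipCols r.length (r :: rest) = r :: rest then (1 : Int) else 0)
  rw [zipCols_eq r.length (r :: rest) (by simp)
      (fun s hs => by rw [hpre s hs, ← hr])]
  have key : (((List.range (r :: rest).length).all fun i =>
        (List.range (((r :: rest).getD i []).length)).all fun j =>
          decide (((r :: rest).getD i []).getD j 0 = ((r :: rest).getD j []).getD i 0)) = true) ↔
      ((List.range r.length).map (fun m => (r :: rest).map (fun row => row.getD m 0)) = r :: rest) := by
    simp only [List.all_eq_true, List.mem_range, decide_eq_true_eq]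
    constructor
    · intro hc
      apply List.ext_getElem
      · simp [hr]
      intro i h1 h2
      rw [List.getElem_map, List.getElem_range]
      apply List.ext_getElem
      · rw [List.length_map, hn i h2]
      intro j h3 h4
      rw [List.getElem_map]
      have hj : j < (r :: rest).length := by simpa using h3
      have hji : i < ((r :: rest)[j]).length := by rw [hn j hj]; exact h2
      have hij : j < ((r :: rest)[i]).length := h4
      have := hc i h2 j (by rwa [List.getD_eq_getElem _ _ h2])
      rw [List.getD_eq_getElem _ _ h2, List.getD_eq_getElem _ _ hj,
          List.getD_eq_getElem _ _ hij, List.getD_eq_getElem _ _ hji] at this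
      rw [List.getD_eq_getElem _ _ hji]
      exact this.symm
    · intro hT i hi j hj
      have hi' : i < (r :: rest).length := hi
      rw [List.getD_eq_getElem _ _ hi'] at hj ⊢
      have hj' : j < (r :: rest).length := by rw [← hn i hi']; exact hj
      rw [List.getD_eq_getElem _ _ hj']
      have hij : i < ((r :: rest)[j]).length := by rw [hn j hj']; exact hi'
      rw [List.getD_eq_getElem _ _ hij, List.getD_eq_getElem _ _ hj]
      -- read component i of hT, then component j
      have hiT : i < ((List.range r.length).map
          (fun m => (r :: rest).map (fun row => row.getD m 0))).length := by
        simpa [hr] using hi'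
      have h5 := List.getElem_of_eq hT hiT
      rw [List.getElem_map, List.getElem_range] at h5
      have hjm : j < ((r :: rest).map (fun row => row.getD i 0)).length := by
        simpa using hj'
      have h6 := List.getElem_of_eq h5 hjm
      rw [List.getElem_map, List.getD_eq_getElem _ _ hij] at h6
      exact h6.symm
  by_cases hc : ((List.range (r :: rest).length).all fun i =>
        (List.range (((r :: rest).getD i []).length)).all fun j =>
          decide (((r :: rest).getD i []).getD j 0 = ((r :: rest).getD j []).getD i 0)) = true
  · rw [if_pos hc, if_pos (key.mp hc)]
  · rw [if_neg hc, if_neg (fun h => hc (key.mpr h))]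

-- ===== VERDICT (by name: the statement is the Claim_ definition above) =====
theorem solution_spec : Claim_equal_solution := by
  intro arr _ hpre
  unfold Spec_solution
  cases hpre with
  | inl h =>
    cases arr with
    | nil => decide
    | cons r rest => exact main_aux r rest h
  | inr h =>
    obtain ⟨hns, hmis⟩ := h
    simp only [List.any_eq_true, List.mem_range, Bool.and_eq_true, decide_eq_true_eq] at hmis
    obtain ⟨i, hi, j, hj, ⟨hjn, hijn, hne⟩, -⟩ := hmis
    cases arr with
    | nil => simp at hi
    | cons r rest =>
      unfold solution solution_alt
      show _ = (if zipCols r.length (r :: rest) = r :: rest then (1 : Int) else 0)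
      have hA : ¬ (((List.range (r :: rest).length).all fun i =>
          (List.range (((r :: rest).getD i []).length)).all fun j =>
            decide (((r :: rest).getD i []).getD j 0 = ((r :: rest).getD j []).getD i 0)) = true) := by
        intro hc
        simp only [List.all_eq_true, List.mem_range, decide_eq_true_eq] at hc
        exact hne (hc i hi j hj)
      have hB : zipCols r.length (r :: rest) ≠ r :: rest := by
        intro hEq
        apply hns
        intro s hs
        rw [← hEq] at hs
        exact zipCols_row_length r.length (r :: rest) s hs
      rw [if_neg hA, if_neg hB]
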